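-- pv_equiv track=rewrite | github.com/lilly1987/Riftbreaker-mods-260404 | Lilly tool/extract_terrain_layer_ids.py | parse_simple_yaml_sections
-- ===== SOURCE A (Python) =====
-- def parse_simple_yaml_sections(text: str) -> list[tuple[str, list[str]]]:
--     sections: list[tuple[str, list[str]]] = []
--     current_name: str | None = None
--     current_lines: list[str] = []
--
--     for raw_line in text.replace("\r\n", "\n").splitlines():
--         stripped = raw_line.strip()
--         indent = len(raw_line) - len(raw_line.lstrip(" "))
--
--         if stripped and indent == 0 and stripped.endswith(":"):
--             if current_name is not None:
--                 sections.append((current_name, current_lines))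
--             current_name = stripped[:-1]
--             current_lines = []
--         elif current_name is not None:
--             current_lines.append(raw_line)
--
--     if current_name is not None:
--         sections.append((current_name, current_lines))
--
--     return sections
-- ===== SOURCE B (Python) =====
-- def parse_simple_yaml_sections(text: str) -> list[tuple[str, list[str]]]:
--     lines = text.replace("\r\n", "\n").splitlines()
--
--     def is_header(line: str) -> bool:
--         s = line.strip()
--         return s != "" and not line.startswith(" ") and s.endswith(":")
--
--     heads = [(i, line) for i, line in enumerate(lines) if is_header(line)]
--     ends = [i for i, _ in heads[1:]] + [len(lines)]
--     return [(line.strip()[:-1], lines[i + 1:j]) for (i, line), j in zip(heads, ends)]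
-- ===== Notes on version B (the rewrite author's own statement) =====
-- stated objective: alternative
-- what changed: Replaces A's accumulating state machine (current section name + growing body list mutated per line) by boundaries-then-grouping: one pass collects the header line indices, then each section is emitted as the slice of lines between consecutive headers.
import Mathlib
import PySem

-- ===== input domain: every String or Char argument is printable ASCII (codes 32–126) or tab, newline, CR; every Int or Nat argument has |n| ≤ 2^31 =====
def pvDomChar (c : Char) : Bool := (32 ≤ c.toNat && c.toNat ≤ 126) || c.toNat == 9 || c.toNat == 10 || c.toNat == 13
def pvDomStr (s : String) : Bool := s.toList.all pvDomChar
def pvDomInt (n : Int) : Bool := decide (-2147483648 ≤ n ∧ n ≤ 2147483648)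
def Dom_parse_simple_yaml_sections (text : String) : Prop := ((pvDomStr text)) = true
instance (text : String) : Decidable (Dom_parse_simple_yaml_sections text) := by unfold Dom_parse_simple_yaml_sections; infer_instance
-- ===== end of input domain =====

-- B splits the text by header boundaries (collect header indices, then slice between them)
-- instead of A's accumulating state machine; same cost, different decomposition.

-- ===== PORT A =====
-- A-side helper: the loop body of A's for-loop.
-- `raw_line.lstrip(" ")` is ported by hand as dropWhile (· == ' ') (exact: lstrip(" ")
-- removes exactly the maximal run of leading ' ' characters).
def pvStepA (st : List (String × List String) × Option String × List String) (raw_line : String) :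
    List (String × List String) × Option String × List String :=
  let stripped := PySem.Str.strip raw_line
  let indent : Int := PySem.Str.len raw_line - ((raw_line.toList.dropWhile (· == ' ')).length : Int)
  if (!(stripped == "")) && (indent == 0) && PySem.Str.endswith stripped ":" then
    ((match st.2.1 with
      | some n => st.1 ++ [(n, st.2.2)]
      | none => st.1),
     some (PySem.Str.slice stripped none (some (-1))), [])
  else
    match st.2.1 with
    | some _ => (st.1, st.2.1, st.2.2 ++ [raw_line])
    | none => st

def parse_simple_yaml_sections (text : String) : List (String × List String) :=
  let st := (PySem.Str.splitlines (PySem.Str.replace text "\r\n" "\n")).foldl pvStepA ([], none, [])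
  match st.2.1 with
  | some n => st.1 ++ [(n, st.2.2)]
  | none => st.1

-- ===== PORT B =====
def pvIsHeader (line : String) : Bool :=
  let s := PySem.Str.strip line
  (s != "") && (! PySem.Str.startswith line " ") && PySem.Str.endswith s ":"

def parse_simple_yaml_sections_alt (text : String) : List (String × List String) :=
  let lines := PySem.Str.splitlines (PySem.Str.replace text "\r\n" "\n")
  let heads := (PySem.List.enumerate lines 0).filter (fun p => pvIsHeader p.2)
  let ends := heads.tail.map (fun p => p.1) ++ [((lines.length : Int))]
  (heads.zip ends).map (fun q =>
    (PySem.Str.slice (PySem.Str.strip q.1.2) none (some (-1)),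
     PySem.List.slice lines (some (q.1.1 + 1)) (some q.2)))

-- ===== PRECONDITION & SPEC =====
def Spec_parse_simple_yaml_sections (text : String) (out : List (String × List String)) : Prop := out = parse_simple_yaml_sections_alt text
instance (text : String) (out : List (String × List String)) : Decidable (Spec_parse_simple_yaml_sections text out) := by unfold Spec_parse_simple_yaml_sections; infer_instance

-- ===== CLAIM (what is proved, stated in full; the proofs are below) =====
def Claim_equal_parse_simple_yaml_sections : Prop := ∀ (text : String), Dom_parse_simple_yaml_sections text → Spec_parse_simple_yaml_sections text (parse_simple_yaml_sections text)

-- ===== LEMMAS AND PROOFS =====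

-- reference recursion: drop the prologue, then (header, body-until-next-header) groups
def pvName (l : String) : String := PySem.Str.slice (PySem.Str.strip l) none (some (-1))

def pvRef : List String → List (String × List String)
  | [] => []
  | l :: ls =>
    if pvIsHeader l then
      (pvName l, ls.takeWhile (fun x => !pvIsHeader x)) :: pvRef (ls.dropWhile (fun x => !pvIsHeader x))
    else pvRef ls
termination_by ls => ls.length
decreasing_by
  · exact Nat.lt_succ_of_le (List.length_dropWhile_le _ _)
  · exact Nat.lt_succ_self _

-- B's body as a function of the line list
def pvHeads (lines : List String) : List (Int × String) :=
  (PySem.List.enumerate lines 0).filter (fun p => pvIsHeader p.2)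

def pvAltBody (lines : List String) : List (String × List String) :=
  let heads := pvHeads lines
  let ends := heads.tail.map (fun p => p.1) ++ [((lines.length : Int))]
  (heads.zip ends).map (fun q =>
    (pvName q.1.2, PySem.List.slice lines (some (q.1.1 + 1)) (some q.2)))

-- final flush of A's loop state
def pvFin (st : List (String × List String) × Option String × List String) : List (String × List String) :=
  match st.2.1 with
  | some n => st.1 ++ [(n, st.2.2)]
  | none => st.1

theorem pvIndent_eq (l : List Char) :
    ((((l.length : Int)) - ((l.dropWhile (· == ' ')).length : Int)) == 0) = (! PySem.Chars.startswith l [' ']) := by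
  cases l with
  | nil => decide
  | cons c cs =>
    by_cases hc : c = ' '
    · subst hc
      have h1 : (cs.dropWhile (· == ' ')).length ≤ cs.length := List.length_dropWhile_le _ _
      have h2 : PySem.Chars.startswith (' '::cs) [' '] = true :=
        (PySem.Chars.startswith_iff _ _).mpr ⟨cs, rfl⟩
      rw [List.dropWhile_cons, if_pos (by simp), h2, Bool.not_true]
      simp only [List.length_cons, beq_eq_false_iff_ne, ne_eq]
      omega
    · have h2 : PySem.Chars.startswith (c::cs) [' '] = false := by
        rcases h : PySem.Chars.startswith (c::cs) [' '] with _ | _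
        · rfl
        · have := (PySem.Chars.startswith_iff _ _).mp h
          rw [List.cons_prefix_cons] at this
          exact absurd this.1.symm hc
      rw [List.dropWhile_cons, if_neg (by simp [hc]), h2]
      simp

theorem pvCondA_eq (raw : String) :
    ((!(PySem.Str.strip raw == "")) && ((PySem.Str.len raw - ((raw.toList.dropWhile (· == ' ')).length : Int)) == 0) && PySem.Str.endswith (PySem.Str.strip raw) ":") = pvIsHeader raw := by
  unfold pvIsHeader
  have hlen : PySem.Str.len raw = (raw.toList.length : Int) := by simp
  have hsw : PySem.Str.startswith raw " " = PySem.Chars.startswith raw.toList [' '] := by simp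
  rw [hlen, pvIndent_eq, ← hsw]
  rfl

theorem pvStepA_eq (st : List (String × List String) × Option String × List String) (raw : String) :
    pvStepA st raw = if pvIsHeader raw then (pvFin st, some (pvName raw), [])
      else match st.2.1 with
        | some _ => (st.1, st.2.1, st.2.2 ++ [raw])
        | none => st := by
  simp only [pvStepA, pvFin, pvName]
  rw [pvCondA_eq]

theorem pvFold_some (ls : List String) (secs : List (String × List String)) (n : String) (cur : List String) :
    pvFin (ls.foldl pvStepA (secs, some n, cur)) =
      secs ++ [(n, cur ++ ls.takeWhile (fun x => !pvIsHeader x))] ++ pvRef (ls.dropWhile (fun x => !pvIsHeader x)) := by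
  induction ls generalizing secs n cur with
  | nil => simp [pvFin, pvRef]
  | cons l ls ih =>
    rw [List.foldl_cons, pvStepA_eq]
    by_cases hl : pvIsHeader l
    · rw [if_pos hl, ih]
      show (pvFin (secs, some n, cur)) ++ _ ++ _ = _
      rw [List.takeWhile_cons, if_neg (by simp [hl]), List.dropWhile_cons,
        if_neg (by simp [hl]), pvRef, if_pos hl]
      simp [pvFin]
    · rw [if_neg hl]
      show pvFin (List.foldl pvStepA (secs, some n, cur ++ [l]) ls) = _
      rw [ih, List.takeWhile_cons, if_pos (by simp [hl]), List.dropWhile_cons,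
        if_pos (by simp [hl])]
      simp

theorem pvFold_none (ls : List String) (secs : List (String × List String)) (cur : List String) :
    pvFin (ls.foldl pvStepA (secs, none, cur)) = secs ++ pvRef ls := by
  induction ls generalizing secs cur with
  | nil => simp [pvFin, pvRef]
  | cons l ls ih =>
    rw [List.foldl_cons, pvStepA_eq]
    by_cases hl : pvIsHeader l
    · rw [if_pos hl]
      show pvFin (List.foldl pvStepA (pvFin (secs, none, cur), some (pvName l), []) ls) = _
      rw [pvFold_some, pvRef, if_pos hl]
      simp [pvFin]
    · rw [if_neg hl]
      show pvFin (List.foldl pvStepA (secs, none, cur) ls) = _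
      rw [ih, pvRef, if_neg (by simp [hl])]

theorem pvEnum_shift {α : Type} (ls : List α) (k : Int) :
    PySem.List.enumerate ls (k+1) = (PySem.List.enumerate ls k).map (fun p => (p.1+1, p.2)) := by
  induction ls generalizing k with
  | nil => simp [PySem.List.enumerate_nil]
  | cons x xs ih => simp [PySem.List.enumerate_cons, ih]

theorem pvHeads_cons (l : String) (ls : List String) :
    pvHeads (l :: ls) = (if pvIsHeader l then [((0:Int), l)] else []) ++ (pvHeads ls).map (fun p => (p.1+1, p.2)) := by
  unfold pvHeads
  rw [PySem.List.enumerate_cons, show (0:Int)+1 = 0+1 from rfl, pvEnum_shift]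
  rw [List.filter_cons, List.filter_map]
  have hf : List.filter ((fun (p : Int × String) => pvIsHeader p.2) ∘ fun p => (p.1 + 1, p.2))
      (PySem.List.enumerate ls 0) = List.filter (fun p => pvIsHeader p.2) (PySem.List.enumerate ls 0) :=
    List.filter_congr (fun a _ => rfl)
  by_cases h : pvIsHeader l <;> simp [h, hf]

theorem pvHeads_nil_take (ls : List String) (h : pvHeads ls = []) :
    ls.takeWhile (fun x => !pvIsHeader x) = ls := by
  induction ls with
  | nil => rfl
  | cons l ls ih =>
    rw [pvHeads_cons] at h
    by_cases hl : pvIsHeader l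
    · simp [hl] at h
    · simp [hl] at h
      simp [List.takeWhile_cons, hl, ih h]

theorem pvHeads_nil_ref (ls : List String) (h : pvHeads ls = []) : pvRef ls = [] := by
  induction ls with
  | nil => simp [pvRef]
  | cons l ls ih =>
    rw [pvHeads_cons] at h
    by_cases hl : pvIsHeader l
    · simp [hl] at h
    · simp [hl] at h
      rw [pvRef, if_neg (by simp [hl])]
      exact ih h

theorem pvHeads_head_idx (ls : List String) (p : Int × String) (rest : List (Int × String))
    (h : pvHeads ls = p :: rest) : p.1 = ((ls.takeWhile (fun x => !pvIsHeader x)).length : Int) := by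
  induction ls generalizing p rest with
  | nil => simp [pvHeads, PySem.List.enumerate_nil] at h
  | cons l ls ih =>
    rw [pvHeads_cons] at h
    by_cases hl : pvIsHeader l
    · simp only [hl, if_true, List.singleton_append, List.cons.injEq] at h
      simp [← h.1, List.takeWhile_cons, hl]
    · rcases hq : pvHeads ls with _ | ⟨q, qs⟩
      · rw [hq] at h; simp [hl] at h
      · rw [hq] at h
        simp only [hl, if_neg, List.map_cons, List.nil_append, Bool.false_eq_true,
          if_false, List.cons.injEq] at h
        have := ih q qs hq
        rw [← h.1]
        simp only [List.takeWhile_cons, hl, Bool.not_false, Bool.not_true, if_pos,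
          List.length_cons, Bool.not_eq_false']
        omega

theorem pvHeads_nonneg (ls : List String) (q : Int × String) (h : q ∈ pvHeads ls) : 0 ≤ q.1 := by
  unfold pvHeads at h
  have := List.mem_of_mem_filter h
  rw [PySem.List.mem_enumerate_iff] at this
  obtain ⟨k, hk, rfl⟩ := this
  simp

theorem pvSlice_shift {α : Type} (l : α) (ls : List α) (a b : Int) (ha : 0 ≤ a) (hb : 0 ≤ b) :
    PySem.List.slice (l::ls) (some (a+1)) (some (b+1)) = PySem.List.slice ls (some a) (some b) := by
  rw [PySem.List.slice_toNat _ (by omega) (by omega), PySem.List.slice_toNat _ ha hb]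
  rw [show (a+1).toNat = a.toNat + 1 by omega, show (b+1).toNat = b.toNat + 1 by omega]
  simp

theorem pvShift_tail (l : String) (ls : List String) :
    ((((pvHeads ls).map (fun p => (p.1+1, p.2))).zip
        ((((pvHeads ls).map (fun p => (p.1+1, p.2))).tail.map (fun p => p.1)) ++ [(((l::ls).length : Nat) : Int)])).map
      (fun q => (pvName q.1.2, PySem.List.slice (l::ls) (some (q.1.1+1)) (some q.2)))) = pvAltBody ls := by
  unfold pvAltBody
  have htail : ((pvHeads ls).map (fun p => (p.1+1, p.2))).tail = (pvHeads ls).tail.map (fun p => (p.1+1, p.2)) := by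
    cases pvHeads ls <;> rfl
  rw [htail, List.map_map]
  have hends : ((pvHeads ls).tail.map ((fun (p : Int × String) => p.1) ∘ fun p => (p.1+1, p.2))) ++ [(((l::ls).length : Nat) : Int)]
      = ((pvHeads ls).tail.map (fun p => p.1) ++ [((ls.length : Nat) : Int)]).map (fun j => j + 1) := by
    rw [List.map_append, List.map_map]
    congr 1
  rw [hends, List.zip_map, List.map_map]
  apply List.map_congr_left
  intro q hq
  have hmem := List.of_mem_zip hq
  have h1 : 0 ≤ q.1.1 := pvHeads_nonneg ls q.1 hmem.1
  have h2 : 0 ≤ q.2 := by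
    rcases List.mem_append.mp hmem.2 with h | h
    · obtain ⟨r, hr, hre⟩ := List.mem_map.mp h
      rw [← hre]
      exact pvHeads_nonneg ls r (List.mem_of_mem_tail hr)
    · simp at h
      omega
  show (pvName q.1.2, PySem.List.slice (l::ls) (some (q.1.1 + 1 + 1)) (some (q.2 + 1)))
      = (pvName q.1.2, PySem.List.slice ls (some (q.1.1 + 1)) (some q.2))
  rw [pvSlice_shift l ls (q.1.1 + 1) q.2 (by omega) h2]

theorem pvRef_dropWhile (ls : List String) :
    pvRef (ls.dropWhile (fun x => !pvIsHeader x)) = pvRef ls := by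
  induction ls with
  | nil => rfl
  | cons l ls ih =>
    by_cases hl : pvIsHeader l
    · rw [List.dropWhile_cons, if_neg (by simp [hl])]
    · rw [List.dropWhile_cons, if_pos (by simp [hl]), ih,
        pvRef, if_neg (by simp [hl])]

theorem pvAltBody_eq_ref (ls : List String) : pvAltBody ls = pvRef ls := by
  induction ls with
  | nil => simp [pvAltBody, pvHeads, PySem.List.enumerate_nil, pvRef]
  | cons l ls ih =>
    by_cases hl : pvIsHeader l
    · rw [pvRef, if_pos hl]
      unfold pvAltBody
      rw [pvHeads_cons, if_pos hl]
      rcases hq : pvHeads ls with _ | ⟨p, rest⟩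
      · have hslice : PySem.List.slice (l :: ls) (some ((0:Int)+1)) (some (((l::ls).length : Nat) : Int)) = ls := by
          rw [PySem.List.slice_toNat _ (by omega) (by omega)]
          simp [List.length_cons]
        simp only [List.map_nil, List.append_nil, List.singleton_append, List.tail_cons,
          List.nil_append, List.zip_cons_cons, List.zip_nil_right, List.map_cons]
        rw [hslice, pvHeads_nil_take ls hq, pvRef_dropWhile, pvHeads_nil_ref ls hq]
      · have hidx := pvHeads_head_idx ls p rest hq
        have hslice : PySem.List.slice (l :: ls) (some ((0:Int)+1)) (some (p.1+1)) = ls.takeWhile (fun x => !pvIsHeader x) := by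
          rw [hidx, PySem.List.slice_toNat _ (by omega) (by omega)]
          have h1 : ((0:Int)+1).toNat = 1 := by omega
          have h2 : ((((ls.takeWhile (fun x => !pvIsHeader x)).length : Nat) : Int) + 1).toNat
              = (ls.takeWhile (fun x => !pvIsHeader x)).length + 1 := by omega
          rw [h1, h2]
          simp only [List.drop_succ_cons, List.drop_zero, Nat.add_sub_cancel]
          exact (List.prefix_iff_eq_take.mp (List.takeWhile_prefix _)).symm
        have hsh := pvShift_tail l ls
        rw [hq] at hsh
        simp only [List.map_cons, List.tail_cons] at hsh
        simp only [List.singleton_append, List.nil_append, List.tail_cons, List.map_cons,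
          List.cons_append, List.zip_cons_cons]
        rw [hslice, hsh, ih, pvRef_dropWhile]
    · rw [pvRef, if_neg (by simp [hl])]
      unfold pvAltBody
      rw [pvHeads_cons, if_neg (by simp [hl]), List.nil_append]
      have := pvShift_tail l ls
      unfold pvAltBody at this
      rw [this, ← ih]
      unfold pvAltBody
      rfl

theorem pvAlt_eq (text : String) :
    parse_simple_yaml_sections_alt text = pvAltBody (PySem.Str.splitlines (PySem.Str.replace text "\r\n" "\n")) := rfl


-- ===== VERDICT (by name: the statement is the Claim_ definition above) =====
theorem parse_simple_yaml_sections_spec : Claim_equal_parse_simple_yaml_sections := by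
  intro text _
  show parse_simple_yaml_sections text = parse_simple_yaml_sections_alt text
  rw [pvAlt_eq, pvAltBody_eq_ref]
  show pvFin ((PySem.Str.splitlines (PySem.Str.replace text "\r\n" "\n")).foldl pvStepA ([], none, [])) = _
  rw [pvFold_none]
  simp
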